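-- pv_equiv track=rewrite | github.com/jlyden/advent-code-2023 | python/src/06/solution.py | find_lowest_charge_time_binary_search
-- ===== SOURCE A (Python) =====
-- def find_lowest_charge_time_binary_search(bottom, top, total_time, record):
--     if (top - bottom) == 1:
--         return top
--
--     middle = bottom + ((top - bottom) // 2)
--     charged_distance = get_charged_distance(total_time, middle)
--
--     if charged_distance == record:
--         return middle + 1
--     elif charged_distance < record:
--         bottom = middle
--         return find_lowest_charge_time_binary_search(bottom, top, total_time, record)
--     elif charged_distance > record:
--         top = middle
--         return find_lowest_charge_time_binary_search(bottom, top, total_time, record)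
--
-- def get_charged_distance(total_time, charging_time):
--     return charging_time * (total_time - charging_time)
-- ===== SOURCE B (Python) =====
-- def find_lowest_charge_time_binary_search(bottom, top, total_time, record):
--     while top - bottom != 1:
--         middle = bottom + ((top - bottom) // 2)
--         charged_distance = middle * (total_time - middle)
--         if charged_distance == record:
--             return middle + 1
--         if charged_distance < record:
--             bottom = middle
--         else:
--             top = middle
--     return top
-- ===== Notes on version B (the rewrite author's own statement) =====
-- stated objective: idiomatic
-- what changed: The tail-recursive binary search is rewritten as an iterative while-loop with mutable bottom/top locals (and the helper get_charged_distance inlined), keeping every branch and tie-break identical.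
-- outside the precondition, e.g. on find_lowest_charge_time_binary_search(3, 2, 5, 6): A returns 3, B returns 3
import Mathlib
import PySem

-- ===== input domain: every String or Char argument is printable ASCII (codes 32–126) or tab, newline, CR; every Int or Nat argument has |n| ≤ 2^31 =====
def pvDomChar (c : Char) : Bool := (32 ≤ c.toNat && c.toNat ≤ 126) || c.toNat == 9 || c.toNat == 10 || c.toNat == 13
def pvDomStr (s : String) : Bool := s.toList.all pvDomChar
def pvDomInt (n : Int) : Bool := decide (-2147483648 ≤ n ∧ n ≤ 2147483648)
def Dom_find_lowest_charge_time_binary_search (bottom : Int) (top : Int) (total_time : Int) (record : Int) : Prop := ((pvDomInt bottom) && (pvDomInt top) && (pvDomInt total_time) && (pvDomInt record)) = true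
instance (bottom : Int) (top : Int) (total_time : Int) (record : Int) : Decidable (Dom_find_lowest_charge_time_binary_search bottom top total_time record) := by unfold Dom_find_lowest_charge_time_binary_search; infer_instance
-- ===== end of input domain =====

-- B rewrites the tail-recursive binary search as an iterative while-loop (state machine), same branches and tie-breaks.


-- ===== PORT A =====
-- helper get_charged_distance from the Python module
def get_charged_distance (total_time : Int) (charging_time : Int) : Int :=
  charging_time * (total_time - charging_time)

-- A's recursion, with a fuel parameter that only makes the recursion total in Lean;
-- under Pre_ (1 ≤ top - bottom) the interval at least halves each step, so the
-- logarithmic fuel (top - bottom).toNat.log2 + 1 never runs out.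
def goA : Nat → Int → Int → Int → Int → Int
  | 0, _, top, _, _ => top  -- fuel exhausted (unreachable under Pre_)
  | fuel + 1, bottom, top, total_time, record =>
    if top - bottom = 1 then top
    else
      let middle := bottom + PySem.Int.floordiv (top - bottom) 2
      let charged_distance := get_charged_distance total_time middle
      if charged_distance = record then middle + 1
      else if charged_distance < record then goA fuel middle top total_time record
      else goA fuel bottom middle total_time record

def find_lowest_charge_time_binary_search (bottom : Int) (top : Int) (total_time : Int) (record : Int) : Int :=
  goA ((top - bottom).toNat.log2 + 1) bottom top total_time record

-- ===== PORT B =====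
-- B's while-loop as a state machine: .inl (bottom, top) = still looping, .inr v = returned v.
def stepB (total_time : Int) (record : Int) : (Int × Int) ⊕ Int → (Int × Int) ⊕ Int
  | .inr v => .inr v
  | .inl (bottom, top) =>
    if top - bottom ≠ 1 then
      let middle := bottom + PySem.Int.floordiv (top - bottom) 2
      let charged_distance := middle * (total_time - middle)
      if charged_distance = record then .inr (middle + 1)
      else if charged_distance < record then .inl (middle, top)
      else .inl (bottom, middle)
    else .inr top

def find_lowest_charge_time_binary_search_alt (bottom : Int) (top : Int) (total_time : Int) (record : Int) : Int :=
  match (stepB total_time record)^[(top - bottom).toNat.log2 + 1] (.inl (bottom, top)) with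
  | .inr v => v
  | .inl (_, t) => t

-- ===== PRECONDITION & SPEC =====
-- Pre_ excludes malformed intervals (top - bottom < 1) on which the Python recursion
-- (and B's loop) diverges, EXCEPT the empty interval top = bottom whose midpoint happens to
-- hit the record exactly, where A returns (bottom + 1) and B agrees; on intervals with
-- top < bottom an accidental record hit along the drifting midpoints can also make A return
-- (B agreeing), but that set is not closed-form and stays excluded.
def Pre_find_lowest_charge_time_binary_search (bottom : Int) (top : Int) (total_time : Int) (record : Int) : Prop :=
  1 ≤ top - bottom ∨ (top = bottom ∧ bottom * (total_time - bottom) = record)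
instance (bottom : Int) (top : Int) (total_time : Int) (record : Int) : Decidable (Pre_find_lowest_charge_time_binary_search bottom top total_time record) := by unfold Pre_find_lowest_charge_time_binary_search; infer_instance
def pvWitness_find_lowest_charge_time_binary_search : Int × Int × Int × Int := (0, 10, 10, 21)

def Spec_find_lowest_charge_time_binary_search (bottom : Int) (top : Int) (total_time : Int) (record : Int) (out : Int) : Prop := out = find_lowest_charge_time_binary_search_alt bottom top total_time record
instance (bottom : Int) (top : Int) (total_time : Int) (record : Int) (out : Int) : Decidable (Spec_find_lowest_charge_time_binary_search bottom top total_time record out) := by unfold Spec_find_lowest_charge_time_binary_search; infer_instance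

-- ===== CLAIM (what is proved, stated in full; the proofs are below) =====
def Claim_equal_find_lowest_charge_time_binary_search : Prop := ∀ (bottom : Int) (top : Int) (total_time : Int) (record : Int), Dom_find_lowest_charge_time_binary_search bottom top total_time record → Pre_find_lowest_charge_time_binary_search bottom top total_time record → Spec_find_lowest_charge_time_binary_search bottom top total_time record (find_lowest_charge_time_binary_search bottom top total_time record)

-- ===== LEMMAS AND PROOFS =====

theorem floordiv_two_bounds (g : Int) (h : 2 ≤ g) :
    1 ≤ PySem.Int.floordiv g 2 ∧ PySem.Int.floordiv g 2 ≤ g - 1 := by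
  rw [PySem.Int.floordiv_eq_ediv_of_pos (by norm_num)]
  omega

theorem stepB_propagate (total_time record v : Int) :
    ∀ k, (stepB total_time record)^[k] (Sum.inr (α := Int × Int) v) = .inr v := by
  intro k; induction k with
  | zero => rfl
  | succ k ihk => rw [Function.iterate_succ_apply]; simpa [stepB] using ihk

theorem runB_eq_goA (total_time record : Int) :
    ∀ (n : Nat) (b t : Int), 1 ≤ t - b → t - b ≤ (2 : Int) ^ n →
      (match (stepB total_time record)^[n] (.inl (b, t)) with
       | .inr v => v
       | .inl (_, t') => t') = goA n b t total_time record := by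
  intro n
  induction n with
  | zero =>
    intro b t h1 h2
    have hg : t - b = 1 := by simpa using le_antisymm h2 h1
    simp [goA]
  | succ n ih =>
    intro b t h1 h2
    rw [Function.iterate_succ_apply]
    by_cases hg : t - b = 1
    · simp [stepB, hg, goA, stepB_propagate]
    · have hg2 : 2 ≤ t - b := by omega
      obtain ⟨hlo, hhi⟩ := floordiv_two_bounds (t - b) hg2
      have hfd : PySem.Int.floordiv (t - b) 2 = (t - b) / 2 :=
        PySem.Int.floordiv_eq_ediv_of_pos (by norm_num)
      rw [hfd] at hlo hhi
      set m := b + (t - b) / 2 with hm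
      by_cases he : m * (total_time - m) = record
      · have hstep : stepB total_time record (.inl (b, t)) = .inr (m + 1) := by
          simp [stepB, hg, ← hm, he]
        rw [hstep, stepB_propagate]
        simp [goA, hg, get_charged_distance, ← hm, he]
      · by_cases hlt : m * (total_time - m) < record
        · have hstep : stepB total_time record (.inl (b, t)) = .inl (m, t) := by
            simp [stepB, hg, ← hm, he, hlt]
          have hP : (0:Int) < 2 ^ n := pow_pos (by norm_num) n
          have h2'' : t - b ≤ 2 * 2 ^ n := by rw [pow_succ] at h2; omega
          rw [hstep, ih m t (by omega) (by omega)]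
          simp [goA, hg, get_charged_distance, ← hm, he, hlt]
        · have hstep : stepB total_time record (.inl (b, t)) = .inl (b, m) := by
            simp [stepB, hg, ← hm, he, hlt]
          have hP : (0:Int) < 2 ^ n := pow_pos (by norm_num) n
          have h2'' : t - b ≤ 2 * 2 ^ n := by rw [pow_succ] at h2; omega
          rw [hstep, ih b m (by omega) (by omega)]
          have hgt : record < m * (total_time - m) := by omega
          simp [goA, hg, get_charged_distance, ← hm, he, hlt]

-- ===== VERDICT (by name: the statement is the Claim_ definition above) =====
theorem find_lowest_charge_time_binary_search_spec : Claim_equal_find_lowest_charge_time_binary_search := by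
  intro bottom top total_time record _ hpre
  unfold Spec_find_lowest_charge_time_binary_search
  unfold find_lowest_charge_time_binary_search find_lowest_charge_time_binary_search_alt
  rcases hpre with hpre' | ⟨hteq, hhit⟩
  · have hn : (top - bottom).toNat < 2 ^ ((top - bottom).toNat.log2 + 1) := Nat.lt_log2_self
    have hle : top - bottom ≤ (2 : Int) ^ ((top - bottom).toNat.log2 + 1) := by
      have h0 := Int.toNat_of_nonneg (a := top - bottom) (by omega)
      calc top - bottom = ((top - bottom).toNat : Int) := h0.symm
        _ ≤ (2 : Int) ^ ((top - bottom).toNat.log2 + 1) := by exact_mod_cast Nat.le_of_lt hn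
    exact (runB_eq_goA total_time record ((top - bottom).toNat.log2 + 1) bottom top hpre' hle).symm
  · subst hteq
    simp [goA, stepB, PySem.Int.floordiv, get_charged_distance, hhit]
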